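-- pv_equiv track=rewrite | github.com/Chaklader/Technical-Interview | Python/Codility/lesson 4 . Counting Elements /count_elements.py | solution
-- ===== SOURCE A (Python) =====
-- def solution(N, A):
--     result = [0]*N
--
--     for command in A:
--         if 1 <= command <= N:
--             result[command-1] += 1
--         else:
--             result[:] = [max(result)]*N
--
--     return result
-- ===== SOURCE B (Python) =====
-- def solution(N, A):
--     # Lazy max-counters: O(N+M) instead of A's O(N*M).
--     floor = 0        # pending reset level, applied lazily
--     cur_max = 0      # current maximum counter value
--     counts = {}      # counters actually touched since the start
--     for command in A:
--         if 1 <= command <= N: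
--             v = max(counts.get(command, floor), floor) + 1
--             counts[command] = v
--             if v > cur_max:
--                 cur_max = v
--         else:
--             floor = cur_max
--     return [max(counts.get(i + 1, floor), floor) for i in range(N)]
-- ===== Notes on version B (the rewrite author's own statement) =====
-- stated objective: faster
-- what changed: Replaces the in-place counter list with per-resets materialised by max(result) and [max]*N copying by a lazy scheme: a dict of touched counters plus a running maximum and a pending reset floor, applied once at the end.
import Mathlib
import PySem

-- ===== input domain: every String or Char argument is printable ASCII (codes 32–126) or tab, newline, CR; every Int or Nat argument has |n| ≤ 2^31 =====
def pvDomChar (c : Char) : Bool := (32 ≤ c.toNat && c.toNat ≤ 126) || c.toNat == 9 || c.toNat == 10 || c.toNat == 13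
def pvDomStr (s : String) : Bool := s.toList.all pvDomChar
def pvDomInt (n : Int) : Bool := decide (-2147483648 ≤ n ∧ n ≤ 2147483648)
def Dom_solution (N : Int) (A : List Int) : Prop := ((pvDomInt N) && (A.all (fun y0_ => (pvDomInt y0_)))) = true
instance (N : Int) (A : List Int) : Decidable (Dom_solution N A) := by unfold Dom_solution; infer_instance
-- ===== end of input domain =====

-- B replaces A's per-reset max(result) + whole-list copy by a lazy scheme (touched-counter dict,
-- running max, pending reset floor applied at the end): O(N+M) instead of O(N*M).

-- ===== PORT A =====
-- the body of A's for-loop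
def solStep (N : Int) (result : List Int) (command : Int) : List Int :=
  if 1 ≤ command ∧ command ≤ N then
    PySem.List.pySetD result (command - 1) (PySem.List.pyGetD result (command - 1) 0 + 1)
  else
    List.replicate N.toNat ((PySem.List.max? result (fun y => y)).getD 0)

def solution (N : Int) (A : List Int) : List Int :=
  A.foldl (solStep N) (List.replicate N.toNat 0)

-- ===== PORT B =====
-- the body of B's for-loop; state = (floor, cur_max, counts)
def altStep (N : Int) (st : Int × Int × PySem.Dict Int Int) (command : Int) :
    Int × Int × PySem.Dict Int Int :=
  if 1 ≤ command ∧ command ≤ N then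
    let v := max (st.2.2.getD command st.1) st.1 + 1
    (st.1, if v > st.2.1 then v else st.2.1, st.2.2.insert command v)
  else
    (st.2.1, st.2.1, st.2.2)

def solution_alt (N : Int) (A : List Int) : List Int :=
  let s := A.foldl (altStep N) (0, 0, PySem.Dict.empty)
  (List.range N.toNat).map (fun (i : Nat) => max (s.2.2.getD ((i : Int) + 1) s.1) s.1)

-- ===== PRECONDITION & SPEC =====
-- Pre_ excludes exactly the inputs on which A raises: with N ≤ 0 and A non-empty, the first
-- command falls in the reset branch and max([]) raises ValueError.
def Pre_solution (N : Int) (A : List Int) : Prop := 1 ≤ N ∨ A = []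
instance (N : Int) (A : List Int) : Decidable (Pre_solution N A) := by
  unfold Pre_solution; infer_instance

def pvWitness_solution : Int × List Int := (3, [1, 2, 4, 2, 3])

def Spec_solution (N : Int) (A : List Int) (out : List Int) : Prop := out = solution_alt N A
instance (N : Int) (A : List Int) (out : List Int) : Decidable (Spec_solution N A out) := by
  unfold Spec_solution; infer_instance

-- ===== CLAIM (what is proved, stated in full; the proofs are below) =====
def Claim_equal_solution : Prop :=
  ∀ (N : Int) (A : List Int), Dom_solution N A → Pre_solution N A →
    Spec_solution N A (solution N A)

-- ===== LEMMAS AND PROOFS =====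

-- the list B's final comprehension denotes for a given floor/counts state
def rep (N : Int) (floor : Int) (counts : PySem.Dict Int Int) : List Int :=
  (List.range N.toNat).map (fun (i : Nat) => max (counts.getD ((i : Int) + 1) floor) floor)

-- loop invariant of B's state
def BInv (N floor curmax : Int) (counts : PySem.Dict Int Int) : Prop :=
  0 ≤ floor ∧ floor ≤ curmax ∧
  (∀ k v, counts.get? k = some v → v ≤ curmax) ∧
  (curmax = floor ∨ ∃ k, 1 ≤ k ∧ k ≤ N ∧ counts.get? k = some curmax)

theorem length_rep (N floor : Int) (counts : PySem.Dict Int Int) :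
    (rep N floor counts).length = N.toNat := by
  simp [rep]

theorem rep_getElem (N floor : Int) (counts : PySem.Dict Int Int) (i : Nat)
    (hi : i < N.toNat) :
    (rep N floor counts)[i]'(by simp only [length_rep]; exact hi) =
      max (counts.getD ((i : Int) + 1) floor) floor := by
  unfold rep
  rw [List.getElem_map, List.getElem_range]

theorem rep_entry_le (N floor curmax : Int) (counts : PySem.Dict Int Int)
    (hfc : floor ≤ curmax) (hv : ∀ k v, counts.get? k = some v → v ≤ curmax)
    (x : Int) (hx : x ∈ rep N floor counts) : x ≤ curmax := by
  unfold rep at hx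
  rw [List.mem_map] at hx
  obtain ⟨i, _, rfl⟩ := hx
  rcases h : counts.get? ((i : Int) + 1) with _ | v
  · rw [PySem.Dict.getD_of_get?_eq_none _ _ h]; omega
  · rw [PySem.Dict.getD_of_get?_eq_some _ _ h]
    have := hv _ _ h; omega

theorem curmax_mem_rep (N floor curmax : Int) (counts : PySem.Dict Int Int)
    (hN : 1 ≤ N) (hI : BInv N floor curmax counts) :
    curmax ∈ rep N floor counts := by
  obtain ⟨h0, hfc, hv, hw⟩ := hI
  rcases hw with heq | ⟨k, hk1, hkN, hk⟩
  · -- curmax = floor: entry 0 equals curmax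
    have h0' : (0 : Nat) < N.toNat := by omega
    have he : (rep N floor counts)[0]'(by simp only [length_rep]; exact h0') = curmax := by
      rw [rep_getElem _ _ _ 0 h0']
      have h1 : ((0 : Nat) : Int) + 1 = 1 := by norm_num
      rw [h1]
      rcases h : counts.get? (1 : Int) with _ | w
      · rw [PySem.Dict.getD_of_get?_eq_none _ _ h]; omega
      · rw [PySem.Dict.getD_of_get?_eq_some _ _ h]
        have := hv _ _ h; omega
    exact he ▸ List.getElem_mem _
  · -- entry (k-1) equals curmax
    have hidx : (k - 1).toNat < N.toNat := by omega
    have hcast : (((k - 1).toNat : Int) + 1) = k := by omega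
    have he : (rep N floor counts)[(k - 1).toNat]'(by simp only [length_rep]; exact hidx) =
        curmax := by
      rw [rep_getElem _ _ _ _ hidx, hcast, PySem.Dict.getD_of_get?_eq_some _ _ hk]
      omega
    exact he ▸ List.getElem_mem _

theorem max_rep_eq (N floor curmax : Int) (counts : PySem.Dict Int Int)
    (hN : 1 ≤ N) (hI : BInv N floor curmax counts) :
    (PySem.List.max? (rep N floor counts) (fun y => y)).getD 0 = curmax := by
  have hmem := curmax_mem_rep N floor curmax counts hN hI
  have hne : rep N floor counts ≠ [] := by
    intro h; rw [h] at hmem; exact absurd hmem (List.not_mem_nil)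
  rcases h : PySem.List.max? (rep N floor counts) (fun y => y) with _ | m
  · exact absurd ((PySem.List.max?_eq_none_iff _ _).mp h) hne
  · have h1 : m ≤ curmax :=
      rep_entry_le N floor curmax counts hI.2.1 hI.2.2.1 m (PySem.List.max?_mem h)
    have h2 : curmax ≤ m := PySem.List.max?_isMax h curmax hmem
    simp; omega

-- the main simulation: A's fold over rep tracks B's fold over (floor, curmax, counts)
theorem sim (N : Int) (hN : 1 ≤ N) :
    ∀ (A : List Int) (floor curmax : Int) (counts : PySem.Dict Int Int),
      BInv N floor curmax counts →
      A.foldl (solStep N) (rep N floor counts) =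
        rep N (A.foldl (altStep N) (floor, curmax, counts)).1
              (A.foldl (altStep N) (floor, curmax, counts)).2.2 ∧
      BInv N (A.foldl (altStep N) (floor, curmax, counts)).1
            (A.foldl (altStep N) (floor, curmax, counts)).2.1
            (A.foldl (altStep N) (floor, curmax, counts)).2.2
  | [], floor, curmax, counts, hI => ⟨rfl, hI⟩
  | c :: A, floor, curmax, counts, hI => by
    obtain ⟨h0, hfc, hv, hw⟩ := hI
    by_cases hc : 1 ≤ c ∧ c ≤ N
    · -- increment branch
      set v := max (counts.getD c floor) floor + 1 with hvdef
      have hstepB : altStep N (floor, curmax, counts) c =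
          (floor, if v > curmax then v else curmax, counts.insert c v) := by
        simp only [altStep, if_pos hc]
        rw [← hvdef]
      have hidx : (c - 1).toNat < N.toNat := by omega
      have hcast : (((c - 1).toNat : Int) + 1) = c := by omega
      have hget : PySem.List.pyGetD (rep N floor counts) (c - 1) 0 =
          max (counts.getD c floor) floor := by
        rw [PySem.List.pyGetD_eq_getElem _ _ (by omega)
              (by rw [length_rep]; omega)]
        rw [rep_getElem _ _ _ _ hidx, hcast]
      have hstepA : solStep N (rep N floor counts) c =
          rep N floor (counts.insert c v) := by
        simp only [solStep, if_pos hc, hget]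
        rw [PySem.List.pySetD_of_nonneg _ _ (by omega)]
        apply List.ext_getElem
        · simp [length_rep]
        · intro i hi1 hi2
          rw [List.getElem_set]
          rw [length_rep] at hi2
          rw [rep_getElem N floor (counts.insert c v) i hi2, PySem.Dict.getD_insert,
              rep_getElem N floor counts i hi2]
          by_cases hieq : (c - 1).toNat = i
          · have hci : (i : Int) + 1 = c := by omega
            rw [if_pos hieq, if_pos hci, hvdef]
            have h1 := le_max_left (counts.getD c floor) floor
            have h2 := le_max_right (counts.getD c floor) floor
            have h3 := max_le_iff.mpr (And.intro (by omega : counts.getD c floor ≤ max (counts.getD c floor) floor + 1) (by omega : floor ≤ max (counts.getD c floor) floor + 1))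
            omega
          · have hci : ¬ ((i : Int) + 1 = c) := by omega
            rw [if_neg hieq, if_neg hci]
      have hInv' : BInv N floor (if v > curmax then v else curmax) (counts.insert c v) := by
        refine ⟨h0, by split <;> omega, ?_, ?_⟩
        · intro k w hk
          rw [PySem.Dict.get?_insert] at hk
          split at hk
          · cases hk; split <;> omega
          · have := hv _ _ hk; split <;> omega
        · by_cases hvm : v > curmax
          · exact Or.inr ⟨c, hc.1, hc.2, by
              simp only [if_pos hvm]; exact PySem.Dict.get?_insert_self _ _ _⟩
          · simp only [if_neg hvm]
            rcases hw with heq | ⟨k, hk1, hkN, hk⟩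
            · exact Or.inl heq
            · have hkc : k ≠ c := by
                intro h; subst h
                rw [PySem.Dict.getD_of_get?_eq_some _ _ hk] at hvdef
                omega
              exact Or.inr ⟨k, hk1, hkN, by
                rw [PySem.Dict.get?_insert_of_ne _ _ hkc]; exact hk⟩
      have := sim N hN A floor (if v > curmax then v else curmax) (counts.insert c v) hInv'
      simpa [List.foldl_cons, hstepA, hstepB] using this
    · -- reset branch
      have hstepB : altStep N (floor, curmax, counts) c = (curmax, curmax, counts) := by
        simp only [altStep, if_neg hc]
      have hstepA : solStep N (rep N floor counts) c = rep N curmax counts := by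
        simp only [solStep, if_neg hc]
        rw [max_rep_eq N floor curmax counts hN ⟨h0, hfc, hv, hw⟩]
        apply List.ext_getElem
        · simp [length_rep]
        · intro i hi1 hi2
          rw [List.getElem_replicate]
          rw [length_rep] at hi2
          rw [rep_getElem _ _ _ _ hi2]
          rcases h : counts.get? ((i : Int) + 1) with _ | w
          · rw [PySem.Dict.getD_of_get?_eq_none _ _ h]; omega
          · rw [PySem.Dict.getD_of_get?_eq_some _ _ h]
            have := hv _ _ h; omega
      have hInv' : BInv N curmax curmax counts :=
        ⟨by omega, le_refl _, hv, Or.inl rfl⟩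
      have := sim N hN A curmax curmax counts hInv'
      simpa [List.foldl_cons, hstepA, hstepB] using this

theorem rep_zero_empty (N : Int) : rep N 0 PySem.Dict.empty = List.replicate N.toNat 0 := by
  apply List.ext_getElem
  · simp [length_rep]
  · intro i hi1 hi2
    rw [length_rep] at hi1
    rw [rep_getElem _ _ _ _ hi1, List.getElem_replicate, PySem.Dict.getD_empty]
    omega

-- ===== VERDICT (by name: the statement is the Claim_ definition above) =====
theorem solution_spec : Claim_equal_solution := by
  intro N A _ hPre
  unfold Spec_solution solution solution_alt
  rcases hPre with hN | rfl
  · have h := sim N hN A 0 0 PySem.Dict.empty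
      ⟨le_refl _, le_refl _, by intro k v h; simp [PySem.Dict.get?_empty] at h, Or.inl rfl⟩
    rw [← rep_zero_empty N, h.1]
    rfl
  · simp only [List.foldl_nil]
    rw [← rep_zero_empty N]
    rfl
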